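-- pv_equiv track=rewrite | github.com/LounisBou/SharewoodAutomator | sharewoodautomator/__main__.py | process_comma_separated_list
-- ===== SOURCE A (Python) =====
-- from typing import Dict, Optional
--
-- def process_comma_separated_list(value: Optional[str], options: Dict[str, bool]) -> Dict[str, bool]:
--     """Process comma-separated values into dictionary of boolean flags."""
--     if not value:
--         return options
--
--     result = {k: False for k in options.keys()}
--     for item in value.split(","):
--         item = item.strip()
--         if item in result:
--             result[item] = True
--
--     return result
-- ===== SOURCE B (Python) =====
-- from typing import Dict, Optional
--
-- def process_comma_separated_list(value: Optional[str], options: Dict[str, bool]) -> Dict[str, bool]: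
--     """Process comma-separated values into dictionary of boolean flags."""
--     if not value:
--         return options
--     requested = {item.strip() for item in value.split(",")}
--     return {k: k in requested for k in options}
-- ===== Notes on version B (the rewrite author's own statement) =====
-- stated objective: idiomatic
-- what changed: B builds a set of the stripped comma items once and comprehends the result as {k: k in set} over the option keys, instead of A's mutate-a-False-initialized-dict per item with membership tests against the result.
import Mathlib
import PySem

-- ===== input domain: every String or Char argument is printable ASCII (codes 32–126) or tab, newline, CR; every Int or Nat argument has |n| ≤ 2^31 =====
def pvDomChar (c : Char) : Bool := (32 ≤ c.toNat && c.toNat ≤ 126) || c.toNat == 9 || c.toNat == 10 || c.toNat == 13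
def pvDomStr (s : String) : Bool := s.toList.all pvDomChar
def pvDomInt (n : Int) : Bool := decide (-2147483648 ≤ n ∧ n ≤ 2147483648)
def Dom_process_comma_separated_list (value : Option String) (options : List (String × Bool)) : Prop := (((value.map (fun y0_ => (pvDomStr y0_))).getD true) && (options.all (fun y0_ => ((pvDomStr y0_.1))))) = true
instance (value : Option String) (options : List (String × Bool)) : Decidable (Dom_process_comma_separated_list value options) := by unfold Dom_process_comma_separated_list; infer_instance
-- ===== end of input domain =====

-- B replaces A's mutate-a-False-initialized-dict loop by a set of the stripped items plus a
-- membership comprehension over the option keys (idiomatic; same asymptotic cost).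

-- ===== PORT A =====
def process_comma_separated_list (value : Option String) (options : List (String × Bool)) : List (String × Bool) :=
  match value with
  | none => options
  | some s =>
    if s = "" then options
    else
      -- result = {k: False for k in options.keys()}
      let result := options.foldl (fun d kv => PySem.Dict.insert d kv.1 false)
        (PySem.Dict.empty : PySem.Dict String Bool)
      -- for item in value.split(","): item = item.strip(); if item in result: result[item] = True
      let result := ((PySem.Str.split? s ",").getD []).foldl
        (fun d item =>
          let item := PySem.Str.strip item
          if PySem.Dict.contains d item then PySem.Dict.insert d item true else d) result
      result.items

-- ===== PORT B =====
def process_comma_separated_list_alt (value : Option String) (options : List (String × Bool)) : List (String × Bool) :=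
  match value with
  | none => options
  | some s =>
    if s = "" then options
    else
      -- requested = {item.strip() for item in value.split(",")}
      let requested : PySem.Set String :=
        PySem.Set.ofList (((PySem.Str.split? s ",").getD []).map PySem.Str.strip)
      -- {k: k in requested for k in options}
      (options.foldl (fun d kv => PySem.Dict.insert d kv.1 (PySem.Set.contains requested kv.1))
        (PySem.Dict.empty : PySem.Dict String Bool)).items

-- ===== PRECONDITION & SPEC =====
def Spec_process_comma_separated_list (value : Option String) (options : List (String × Bool)) (out : List (String × Bool)) : Prop := out = process_comma_separated_list_alt value options
instance (value : Option String) (options : List (String × Bool)) (out : List (String × Bool)) : Decidable (Spec_process_comma_separated_list value options out) := by unfold Spec_process_comma_separated_list; infer_instance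

-- ===== CLAIM (what is proved, stated in full; the proofs are below) =====
def Claim_equal_process_comma_separated_list : Prop := ∀ (value : Option String) (options : List (String × Bool)), Dom_process_comma_separated_list value options → Spec_process_comma_separated_list value options (process_comma_separated_list value options)

-- ===== LEMMAS AND PROOFS =====

-- A's loop step never changes which keys are present.
theorem pv_step_contains (d : PySem.Dict String Bool) (item k : String) :
    ((if d.contains item then d.insert item true else d).contains k) = d.contains k := by
  by_cases h : d.contains item = true
  · simp only [h, if_true, PySem.Dict.contains_insert]
    by_cases hk : k = item
    · subst hk; simp [h]
    · simp [hk]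
  · simp [h]

-- Effect of A's marking loop on a lookup with default False.
theorem pv_loop_getD (items : List String) :
    ∀ (d : PySem.Dict String Bool) (k : String),
    (items.foldl (fun d item => if d.contains item then d.insert item true else d) d).getD k false
      = (d.getD k false || (d.contains k && items.contains k)) := by
  induction items with
  | nil => intro d k; simp
  | cons a rest ih =>
    intro d k
    rw [List.foldl_cons, ih, pv_step_contains]
    by_cases hk : k = a
    · subst hk
      by_cases h : d.contains k = true
      · simp [h, PySem.Dict.getD_insert_self]
      · simp [h]
    · have hne : k ≠ a := hk
      by_cases h : d.contains a = true
      · simp [h, PySem.Dict.getD_insert_of_ne d true false hne, hk]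
      · simp [h, hk]

-- The False-initialisation gives default lookups False everywhere.
theorem pv_base_getD (options : List (String × Bool)) :
    ∀ (d : PySem.Dict String Bool) (k : String), d.getD k false = false →
    (options.foldl (fun d kv => d.insert kv.1 false) d).getD k false = false := by
  induction options with
  | nil => intro d k h; simpa using h
  | cons a rest ih =>
    intro d k h
    rw [List.foldl_cons]
    exact ih _ k (by rw [PySem.Dict.getD_insert]; split <;> simp [h])

-- B's comprehension: a lookup returns g of the key whenever the key occurs.
theorem pv_altfold_getD (g : String → Bool) (options : List (String × Bool)) :
    ∀ (d : PySem.Dict String Bool) (k : String),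
    (options.foldl (fun d kv => d.insert kv.1 (g kv.1)) d).getD k false
      = if k ∈ options.map (·.1) then g k else d.getD k false := by
  induction options with
  | nil => intro d k; simp
  | cons a rest ih =>
    intro d k
    rw [List.foldl_cons, ih]
    by_cases hmem : k ∈ rest.map (·.1)
    · simp [hmem]
    · by_cases hk : k = a.1
      · simp [hk, PySem.Dict.getD_insert_self]
      · simp [hmem, hk, PySem.Dict.getD_insert_of_ne d (g a.1) false hk]

-- A's loop never changes the key list.
theorem pv_loop_keys (items : List String) :
    ∀ (d : PySem.Dict String Bool),
    (items.foldl (fun d item => if d.contains item then d.insert item true else d) d).keys = d.keys := by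
  induction items with
  | nil => intro d; rfl
  | cons a rest ih =>
    intro d
    rw [List.foldl_cons, ih]
    by_cases h' : d.contains a = true
    · simp [h', PySem.Dict.keys_insert_of_contains d true h']
    · simp [h']

theorem pv_keyfold_keys (g : String → Bool) (options : List (String × Bool)) :
    (options.foldl (fun d kv => d.insert kv.1 (g kv.1)) (PySem.Dict.empty : PySem.Dict String Bool)).keys
      = PySem.Set.ofList (options.map (·.1)) := by
  have h := PySem.Dict.keys_foldl_insert_key (ν := Bool) options (fun kv => kv.1) (fun _ kv => g kv.1) PySem.Dict.empty
  simpa [PySem.Set.update, PySem.Set.ofList_eq_foldl, PySem.Dict.keys_empty] using h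

-- ===== VERDICT (by name: the statement is the Claim_ definition above) =====
theorem process_comma_separated_list_spec : Claim_equal_process_comma_separated_list := by
  intro value options _
  unfold Spec_process_comma_separated_list process_comma_separated_list process_comma_separated_list_alt
  cases value with
  | none => rfl
  | some s =>
    by_cases hs : s = ""
    · simp [hs]
    · simp only [hs, if_false]
      set items := ((PySem.Str.split? s ",").getD []).map PySem.Str.strip with hitems
      set g : String → Bool := fun k => PySem.Set.contains (PySem.Set.ofList items) k with hg
      set base := options.foldl (fun d kv => d.insert kv.1 false)
        (PySem.Dict.empty : PySem.Dict String Bool) with hbase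
      set dA := ((PySem.Str.split? s ",").getD []).foldl
        (fun d item => if d.contains (PySem.Str.strip item) then d.insert (PySem.Str.strip item) true else d) base with hdA
      set dB := options.foldl (fun d kv => d.insert kv.1 (g kv.1))
        (PySem.Dict.empty : PySem.Dict String Bool) with hdB
      have hfoldmap : dA = items.foldl
          (fun d item => if d.contains item then d.insert item true else d) base := by
        rw [hdA, hitems, List.foldl_map]
      have hbk : base.keys = PySem.Set.ofList (options.map (·.1)) :=
        pv_keyfold_keys (fun _ => false) options
      have hAk : dA.keys = PySem.Set.ofList (options.map (·.1)) := by
        rw [hfoldmap, pv_loop_keys, hbk]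
      have hBk : dB.keys = PySem.Set.ofList (options.map (·.1)) :=
        pv_keyfold_keys g options
      have hnd : (PySem.Set.ofList (options.map (·.1))).Nodup := PySem.Set.nodup_ofList _
      have hAget : ∀ k ∈ PySem.Set.ofList (options.map (·.1)), dA.getD k false = dB.getD k false := by
        intro k hk
        have hkmem : k ∈ options.map (·.1) := (PySem.Set.mem_ofList _ _).mp hk
        have hbc : base.contains k = true := by
          rw [PySem.Dict.contains_iff_mem_keys, hbk]; exact hk
        rw [hfoldmap, pv_loop_getD, pv_base_getD options _ k (by simp), hbc,
          hdB, pv_altfold_getD, if_pos hkmem]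
        simp [hg]
      show dA.items = dB.items
      rw [PySem.Dict.items_eq_map_keys dA (by rw [hAk]; exact hnd) false,
        PySem.Dict.items_eq_map_keys dB (by rw [hBk]; exact hnd) false, hAk, hBk]
      exact List.map_congr_left (fun k hk => by rw [hAget k hk])
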